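-- pv_equiv track=rewrite | github.com/anajulijapreseren/Project_Euler | solved_problems/19_Counting_Sundays.py | prvi_dnevi
-- ===== SOURCE A (Python) =====
-- sez1 = [31, 28, 31, 30, 31, 30, 31, 31, 30, 31, 30, 31]
--
-- sez2 = [31, 29, 31, 30, 31, 30, 31, 31, 30, 31, 30, 31]
--
-- def prvi_dnevi(leto):
--     """funkcija bo vrnila seznam z indeksi prvih dnevov v mesecu(vsak dan dodamo 1),
--     začela pa bo šteti 1.1.leto in končala 31.12.(leto + 99)"""
--     sez = []
--     a = 2
--     for i in range(leto, leto + 100):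
--         if i % 4 == 0:#prestopno leto
--             for st in sez2:
--                 a += st
--                 sez.append(a)
--         else:
--             for st in sez1:
--                 a += st
--                 sez.append(a)
--     return sez[:-1]#zadnjega zbrisemo ker pride na naslednje leto
-- ===== SOURCE B (Python) =====
-- # B: closed-form offsets + precomputed in-year cumulative tables; no running accumulator.
-- _C1 = [31, 59, 90, 120, 151, 181, 212, 243, 273, 304, 334, 365]
-- _C2 = [31, 60, 91, 121, 152, 182, 213, 244, 274, 305, 335, 366]
--
-- def prvi_dnevi(leto):
--     base = (leto - 1) // 4
--     out = [2 + 365 * k + ((leto + k - 1) // 4 - base) + c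
--            for k in range(100)
--            for c in (_C2 if (leto + k) % 4 == 0 else _C1)]
--     return out[:-1]
-- ===== Notes on version B (the rewrite author's own statement) =====
-- stated objective: alternative
-- what changed: A keeps a running day accumulator updated month by month inside nested loops; B computes each month's index directly in one flat comprehension from a closed-form year offset (365*k plus a floor-division leap count) plus a precomputed in-year cumulative table, so no running state survives between iterations.
import Mathlib
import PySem

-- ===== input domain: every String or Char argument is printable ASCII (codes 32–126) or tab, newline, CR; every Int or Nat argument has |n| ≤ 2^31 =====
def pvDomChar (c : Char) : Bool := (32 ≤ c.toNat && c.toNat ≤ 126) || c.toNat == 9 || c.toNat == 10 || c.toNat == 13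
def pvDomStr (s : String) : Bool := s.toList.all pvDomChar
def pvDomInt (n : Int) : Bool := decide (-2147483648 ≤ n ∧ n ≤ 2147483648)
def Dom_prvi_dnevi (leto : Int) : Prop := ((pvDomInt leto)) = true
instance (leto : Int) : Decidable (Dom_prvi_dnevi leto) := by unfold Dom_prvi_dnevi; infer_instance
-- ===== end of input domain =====

-- B replaces A's running accumulator with closed-form offsets plus precomputed per-year
-- cumulative tables (objective: alternative decomposition, same cost).

-- ===== PORT A =====
def sez1 : List Int := [31, 28, 31, 30, 31, 30, 31, 31, 30, 31, 30, 31]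
def sez2 : List Int := [31, 29, 31, 30, 31, 30, 31, 31, 30, 31, 30, 31]

-- inner 'for st in sezX: a += st; sez.append(a)'
def innerA (L : List Int) (st : List Int × Int) : List Int × Int :=
  L.foldl (fun st m => (st.1 ++ [st.2 + m], st.2 + m)) st

def prvi_dnevi (leto : Int) : List Int :=
  let st := (PySem.List.pyRange leto (leto + 100) 1).foldl
    (fun st i => if PySem.Int.mod i 4 == 0 then innerA sez2 st else innerA sez1 st)
    ([], 2)
  PySem.List.slice st.1 none (some (-1))   -- sez[:-1]

-- ===== PORT B =====
def pvC1 : List Int := [31, 59, 90, 120, 151, 181, 212, 243, 273, 304, 334, 365]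
def pvC2 : List Int := [31, 60, 91, 121, 152, 182, 213, 244, 274, 305, 335, 366]

def prvi_dnevi_alt (leto : Int) : List Int :=
  let base := PySem.Int.floordiv (leto - 1) 4
  let out := (PySem.List.pyRange 0 100 1).flatMap (fun k =>
    (if PySem.Int.mod (leto + k) 4 == 0 then pvC2 else pvC1).map
      (fun c => 2 + 365 * k + (PySem.Int.floordiv (leto + k - 1) 4 - base) + c))
  PySem.List.slice out none (some (-1))    -- out[:-1]

-- ===== PRECONDITION & SPEC =====
def Spec_prvi_dnevi (leto : Int) (out : List Int) : Prop := out = prvi_dnevi_alt leto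
instance (leto : Int) (out : List Int) : Decidable (Spec_prvi_dnevi leto out) := by unfold Spec_prvi_dnevi; infer_instance

-- ===== CLAIM (what is proved, stated in full; the proofs are below) =====
def Claim_equal_prvi_dnevi : Prop := ∀ (leto : Int), Dom_prvi_dnevi leto → Spec_prvi_dnevi leto (prvi_dnevi leto)

-- ===== LEMMAS AND PROOFS =====

theorem innerA_sez2 (s : List Int) (a : Int) :
    innerA sez2 (s, a) = (s ++ pvC2.map (fun c => a + c), a + 366) := by
  simp [innerA, sez2, pvC2, List.foldl]
  constructor
  · constructor <;> omega
  · omega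

theorem innerA_sez1 (s : List Int) (a : Int) :
    innerA sez1 (s, a) = (s ++ pvC1.map (fun c => a + c), a + 365) := by
  simp [innerA, sez1, pvC1, List.foldl]
  constructor
  · constructor <;> omega
  · omega

theorem fold_eq (leto : Int) (n : Nat) :
    (PySem.List.pyRange leto (leto + (n : Int)) 1).foldl
      (fun st i => if PySem.Int.mod i 4 == 0 then innerA sez2 st else innerA sez1 st)
      ([], 2)
    = ((PySem.List.pyRange 0 (n : Int) 1).flatMap (fun k =>
        (if PySem.Int.mod (leto + k) 4 == 0 then pvC2 else pvC1).map
          (fun c => 2 + 365 * k + (PySem.Int.floordiv (leto + k - 1) 4 - PySem.Int.floordiv (leto - 1) 4) + c)),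
       2 + 365 * (n : Int) + (PySem.Int.floordiv (leto + (n : Int) - 1) 4 - PySem.Int.floordiv (leto - 1) 4)) := by
  induction n with
  | zero => simp [PySem.List.pyRange_one_eq_nil]
  | succ n ih =>
    push_cast
    rw [show leto + ((n : Int) + 1) = (leto + (n : Int)) + 1 by ring, PySem.List.pyRange_one_succ_right (show leto ≤ leto + (n : Int) by omega),
        PySem.List.pyRange_one_succ_right (show (0:Int) ≤ (n : Int) by positivity)]
    rw [List.foldl_append, ih]
    simp only [List.foldl_cons, List.foldl_nil, List.flatMap_append, List.flatMap_cons, List.flatMap_nil, List.append_nil]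
    have hfd : ∀ x : Int, PySem.Int.floordiv x 4 = x / 4 :=
      fun x => PySem.Int.floordiv_eq_ediv_of_pos (by norm_num)
    by_cases h : (leto + (n : Int)) % 4 = 0
    · have hc : (PySem.Int.mod (leto + (n : Int)) 4 == 0) = true := by simp [h]
      simp only [hc, if_true, innerA_sez2]
      rw [Prod.mk.injEq]
      refine ⟨rfl, ?_⟩
      simp only [hfd]
      omega
    · have hc : (PySem.Int.mod (leto + (n : Int)) 4 == 0) = false := by simp [h]
      simp only [hc, Bool.false_eq_true, if_false, innerA_sez1]
      rw [Prod.mk.injEq]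
      refine ⟨rfl, ?_⟩
      simp only [hfd]
      omega

-- ===== VERDICT (by name: the statement is the Claim_ definition above) =====
theorem prvi_dnevi_spec : Claim_equal_prvi_dnevi := by
  intro leto _
  unfold Spec_prvi_dnevi prvi_dnevi prvi_dnevi_alt
  have h := fold_eq leto 100
  simp only [Nat.cast_ofNat] at h
  rw [h]
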